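-- pv_equiv track=rewrite | github.com/swy20190/NiuKe | HJ 24/code.py | dp_list
-- ===== SOURCE A (Python) =====
-- import bisect
--
-- def dp_list(hs):
--     arr = [hs[0]]
--     dp = [1]
--     for i in range(1, len(hs)):
--         if hs[i] > arr[-1]:
--             arr.append(hs[i])
--             dp.append(len(arr))
--         else:
--             idx = bisect.bisect_left(arr, hs[i])
--             arr[idx] = hs[i]
--             dp.append(idx + 1)
--     return dp
-- ===== SOURCE B (Python) =====
-- def dp_list(hs):
--     dp = []
--     for v in hs:
--         best = 0
--         for prev_h, prev_len in zip(hs, dp):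
--             if prev_h < v and prev_len > best:
--                 best = prev_len
--         dp.append(best + 1)
--     return dp
-- ===== Notes on version B (the rewrite author's own statement) =====
-- stated objective: simpler
-- what changed: Replaces the patience-sorting tails array with bisect by the classic quadratic DP: for each element take 1 + the best length among earlier strictly smaller elements.
import Mathlib
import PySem

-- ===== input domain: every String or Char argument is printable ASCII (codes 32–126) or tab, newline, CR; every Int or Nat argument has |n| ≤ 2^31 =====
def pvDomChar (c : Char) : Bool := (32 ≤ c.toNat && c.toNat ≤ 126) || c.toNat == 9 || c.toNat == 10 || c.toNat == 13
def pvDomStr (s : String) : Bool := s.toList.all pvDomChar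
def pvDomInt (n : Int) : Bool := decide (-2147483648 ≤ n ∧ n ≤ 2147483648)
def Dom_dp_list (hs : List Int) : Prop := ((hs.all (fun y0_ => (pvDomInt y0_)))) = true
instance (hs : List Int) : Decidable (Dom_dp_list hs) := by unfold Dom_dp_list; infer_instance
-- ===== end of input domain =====

-- B replaces A's patience-sorting tails array (bisect) by the classic quadratic
-- LIS-ending-here DP; objective: simpler (not faster). A raises IndexError on [],
-- which Pre_ excludes; B returns [] there.

-- ===== PORT A =====
-- bisect.bisect_left on a sorted list: number of leading elements < x
def bisectLeft (arr : List Int) (x : Int) : Nat :=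
  (arr.takeWhile (fun a => decide (a < x))).length

def dpAStep (st : List Int × List Int) (v : Int) : List Int × List Int :=
  if st.1.getD (st.1.length - 1) 0 < v then        -- hs[i] > arr[-1] (arr is nonempty)
    let arr' := st.1 ++ [v]
    (arr', st.2 ++ [((arr'.length : Nat) : Int)])
  else
    let idx := bisectLeft st.1 v
    (st.1.set idx v, st.2 ++ [((idx + 1 : Nat) : Int)])

def dp_list (hs : List Int) : List Int :=
  match hs with
  | [] => []                                        -- Python raises IndexError here; outside Pre_
  | h :: t => (t.foldl dpAStep ([h], [1])).2

-- ===== PORT B =====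
def bestPrev (hs dp : List Int) (v : Int) : Int :=
  (hs.zip dp).foldl (fun best q => if q.1 < v ∧ best < q.2 then q.2 else best) 0

def dp_list_alt (hs : List Int) : List Int :=
  hs.foldl (fun dp v => dp ++ [bestPrev hs dp v + 1]) []

-- ===== PRECONDITION & SPEC =====
-- A reads the first element unconditionally, so it raises IndexError on the empty list; only that input is excluded.
def Pre_dp_list (hs : List Int) : Prop := hs ≠ []
instance (hs : List Int) : Decidable (Pre_dp_list hs) := by unfold Pre_dp_list; infer_instance
def pvWitness_dp_list : List Int := [3, 1, 2, 2, 5]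

def Spec_dp_list (hs : List Int) (out : List Int) : Prop := out = dp_list_alt hs
instance (hs : List Int) (out : List Int) : Decidable (Spec_dp_list hs out) := by unfold Spec_dp_list; infer_instance

-- ===== CLAIM (what is proved, stated in full; the proofs are below) =====
def Claim_equal_dp_list : Prop := ∀ (hs : List Int), Dom_dp_list hs → Pre_dp_list hs → Spec_dp_list hs (dp_list hs)

-- ===== LEMMAS AND PROOFS =====

-- The invariant tying A's tails array `arr` to the processed pairs Z = (value, LIS-length-ending-there):
-- arr is strictly increasing, arr[k] is the value of some pair of length k+1, and every pair of
-- length k+1 has value ≥ arr[k] (so arr[k] is the minimal tail of length k+1).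
def TailsInv (Z : List (Int × Int)) (arr : List Int) : Prop :=
  arr ≠ [] ∧ arr.Pairwise (· < ·) ∧
  (∀ k : Nat, k < arr.length → (arr.getD k 0, ((k : Int) + 1)) ∈ Z) ∧
  (∀ q ∈ Z, ∃ k : Nat, k < arr.length ∧ q.2 = (k : Int) + 1 ∧ arr.getD k 0 ≤ q.1)

lemma getD_tw {f : Int → Bool} : ∀ (l : List Int) (k : Nat),
    k < (l.takeWhile f).length → f (l.getD k 0) = true := by
  intro l
  induction l with
  | nil => intro k h; simp [List.takeWhile] at h
  | cons a t ih =>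
    intro k h
    by_cases hfa : f a = true
    · simp [List.takeWhile, hfa] at h
      cases k with
      | zero => simpa using hfa
      | succ k => exact ih k (by omega)
    · simp [List.takeWhile, hfa] at h

lemma getD_tw_stop {f : Int → Bool} : ∀ (l : List Int),
    (l.takeWhile f).length < l.length → f (l.getD (l.takeWhile f).length 0) = false := by
  intro l
  induction l with
  | nil => simp
  | cons a t ih =>
    intro h
    by_cases hfa : f a = true
    · simp [List.takeWhile, hfa] at h ⊢
      exact ih (by omega)
    · simp [List.takeWhile, hfa]

lemma tw_len_le {f : Int → Bool} : ∀ (l : List Int), (l.takeWhile f).length ≤ l.length := by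
  intro l
  induction l with
  | nil => simp
  | cons a t ih =>
    by_cases hfa : f a = true
    · simp [List.takeWhile, hfa]; omega
    · simp [List.takeWhile, hfa]

lemma pw_getD {arr : List Int} (hpw : arr.Pairwise (· < ·)) {i j : Nat}
    (hij : i < j) (hj : j < arr.length) : arr.getD i 0 < arr.getD j 0 := by
  rw [List.getD_eq_getElem arr 0 (by omega), List.getD_eq_getElem arr 0 hj]
  exact List.pairwise_iff_getElem.mp hpw i j (by omega) hj hij

lemma pw_getD_le {arr : List Int} (hpw : arr.Pairwise (· < ·)) {i j : Nat}
    (hij : i ≤ j) (hj : j < arr.length) : arr.getD i 0 ≤ arr.getD j 0 := by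
  rcases Nat.lt_or_ge i j with h | h
  · exact le_of_lt (pw_getD hpw h hj)
  · have : i = j := by omega
    simp [this]

lemma getD_set_self : ∀ (l : List Int) (i : Nat) (v : Int), i < l.length →
    (l.set i v).getD i 0 = v := by
  intro l i v h
  rw [List.getD_eq_getElem _ 0 (by simpa using h)]
  simp

lemma getD_set_ne : ∀ (l : List Int) (i k : Nat) (v : Int), i ≠ k →
    (l.set i v).getD k 0 = l.getD k 0 := by
  intro l i k v h
  by_cases hk : k < l.length
  · rw [List.getD_eq_getElem _ 0 (by simpa using hk), List.getD_eq_getElem _ 0 hk]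
    simp [h]
  · rw [List.getD_eq_getElem?_getD, List.getD_eq_getElem?_getD,
      List.getElem?_eq_none (l := l.set i v) (by simp; omega),
      List.getElem?_eq_none (by omega)]

lemma getD_append_last : ∀ (l : List Int) (v : Int), (l ++ [v]).getD l.length 0 = v := by
  intro l v
  rw [List.getD_eq_getElem _ 0 (by simp)]
  simp

-- fold bounds for bestPrev's inner fold
lemma fold_acc_le (v : Int) : ∀ (Z : List (Int × Int)) (a : Int),
    a ≤ Z.foldl (fun best q => if q.1 < v ∧ best < q.2 then q.2 else best) a := by
  intro Z
  induction Z with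
  | nil => intro a; simp
  | cons q Z ih =>
    intro a
    refine le_trans ?_ (ih (if q.1 < v ∧ a < q.2 then q.2 else a))
    split_ifs with h
    · simp at h; omega
    · omega

lemma fold_mem_le (v : Int) : ∀ (Z : List (Int × Int)) (a : Int) (q : Int × Int),
    q ∈ Z → q.1 < v → q.2 ≤ Z.foldl (fun best q => if q.1 < v ∧ best < q.2 then q.2 else best) a := by
  intro Z
  induction Z with
  | nil => intro a q h; simp at h
  | cons r Z ih =>
    intro a q hmem hq
    rcases List.mem_cons.mp hmem with h | h
    · subst h
      refine le_trans ?_ (fold_acc_le v Z _)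
      dsimp only
      split_ifs with h
      · omega
      · simp [hq] at h; omega
    · exact ih _ q h hq

lemma fold_le (v B : Int) : ∀ (Z : List (Int × Int)) (a : Int),
    a ≤ B → (∀ q ∈ Z, q.1 < v → q.2 ≤ B) →
    Z.foldl (fun best q => if q.1 < v ∧ best < q.2 then q.2 else best) a ≤ B := by
  intro Z
  induction Z with
  | nil => intro a ha _; simpa using ha
  | cons r Z ih =>
    intro a ha hall
    simp only [List.foldl_cons]
    refine ih _ ?_ (fun q hq => hall q (List.mem_cons_of_mem _ hq))
    split_ifs with h
    · simp at h
      exact hall r (List.mem_cons_self) h.1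
    · exact ha

lemma zip_trunc : ∀ (p rest dp : List Int), dp.length ≤ p.length →
    (p ++ rest).zip dp = p.zip dp := by
  intro p
  induction p with
  | nil =>
    intro rest dp h
    have : dp = [] := List.length_eq_zero_iff.mp (by simpa using h)
    simp [this]
  | cons a p ih =>
    intro rest dp h
    cases dp with
    | nil => simp
    | cons b dp => simp [List.zip_cons_cons]; exact ih rest dp (by simpa using h)

-- bestPrev over the processed prefix equals bisect_left into the tails array
lemma best_eq (v : Int) (p dp arr : List Int) (hinv : TailsInv (p.zip dp) arr) :
    bestPrev p dp v = ((bisectLeft arr v : Nat) : Int) := by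
  obtain ⟨hne, hpw, hex, hmin⟩ := hinv
  set Z := p.zip dp with hZ
  set c := bisectLeft arr v with hc
  have hc' : (arr.takeWhile (fun a => decide (a < v))).length = c := by rw [hc]; rfl
  have hcle : c ≤ arr.length := tw_len_le arr
  have hub : ∀ q ∈ Z, q.1 < v → q.2 ≤ (c : Int) := by
    intro q hq hqv
    obtain ⟨k, hk, hk2, hk3⟩ := hmin q hq
    have hkc : k < c := by
      by_contra hkc
      have hclt : c < arr.length := by omega
      have hstop := getD_tw_stop (f := fun a => decide (a < v)) arr
      rw [hc'] at hstop
      have h1 : ¬ (arr.getD c 0 < v) := by simpa using hstop hclt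
      have h2 : arr.getD c 0 ≤ arr.getD k 0 := pw_getD_le hpw (by omega) hk
      omega
    omega
  apply le_antisymm
  · exact fold_le v (c : Int) Z 0 (by positivity) hub
  · cases hcn : c with
    | zero => simpa [hcn] using fold_acc_le v Z 0
    | succ m =>
      have hm : m < arr.length := by omega
      have hmem := hex m hm
      have hlt : arr.getD m 0 < v := by
        have := getD_tw (f := fun a => decide (a < v)) arr m (by rw [hc']; omega)
        simpa using this
      have := fold_mem_le v Z 0 _ hmem hlt
      simp only [bestPrev, ← hZ]
      push_cast
      omega

-- one step of A appends bisectLeft+1 and preserves the invariant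
lemma inv_step (v : Int) (p arr dp : List Int) (hinv : TailsInv (p.zip dp) arr)
    (hlen : dp.length = p.length) :
    ∃ arr', dpAStep (arr, dp) v = (arr', dp ++ [((bisectLeft arr v : Nat) : Int) + 1]) ∧
      TailsInv ((p ++ [v]).zip (dp ++ [((bisectLeft arr v : Nat) : Int) + 1])) arr' := by
  obtain ⟨hne, hpw, hex, hmin⟩ := hinv
  set c := bisectLeft arr v with hc
  have hc' : (arr.takeWhile (fun a => decide (a < v))).length = c := by rw [hc]; rfl
  have harrlen : 0 < arr.length := by
    cases arr with
    | nil => exact absurd rfl hne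
    | cons a t => simp
  have hzip : (p ++ [v]).zip (dp ++ [((c : Nat) : Int) + 1]) =
      p.zip dp ++ [(v, ((c : Nat) : Int) + 1)] := by
    rw [List.zip_append hlen.symm]; rfl
  by_cases hbr : arr.getD (arr.length - 1) 0 < v
  · -- append branch: v beats the last tail, c = arr.length
    have hall : ∀ k, k < arr.length → arr.getD k 0 < v := by
      intro k hk
      exact lt_of_le_of_lt (pw_getD_le hpw (by omega) (by omega)) hbr
    have hceq : c = arr.length := by
      by_contra h
      have hc2 : c < arr.length := lt_of_le_of_ne (tw_len_le arr) h
      have h1 := getD_tw_stop (f := fun a => decide (a < v)) arr (by rw [hc']; exact hc2)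
      rw [hc'] at h1
      have h2 := hall c hc2
      simp only [decide_eq_false_iff_not, not_lt] at h1
      omega
    refine ⟨arr ++ [v], ?_, ?_, ?_, ?_, ?_⟩
    · simp only [dpAStep, if_pos hbr]
      have : ((arr ++ [v]).length : Int) = ((c : Nat) : Int) + 1 := by
        rw [hceq]
        simp
      simp
      exact hceq.symm
    · simp
    · refine List.pairwise_append.mpr ⟨hpw, by simp, ?_⟩
      intro a ha b hb
      rw [List.mem_singleton.mp hb]
      obtain ⟨k, hk, hka⟩ := List.mem_iff_getElem.mp ha
      have := hall k hk
      rw [List.getD_eq_getElem arr 0 hk] at this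
      omega
    · intro k hk
      rw [hzip]
      rcases Nat.lt_or_ge k arr.length with h | h
      · rw [List.getD_append arr [v] 0 k h]
        exact List.mem_append_left _ (hex k h)
      · have hkeq : k = arr.length := by simp at hk; omega
        subst hkeq
        rw [getD_append_last]
        simp [hceq]
    · intro q hq
      rw [hzip] at hq
      rcases List.mem_append.mp hq with h | h
      · obtain ⟨k, hk, hk2, hk3⟩ := hmin q h
        exact ⟨k, by simp; omega, hk2, by rw [List.getD_append arr [v] 0 k hk]; exact hk3⟩
      · rw [List.mem_singleton.mp h]
        exact ⟨arr.length, by simp, by simp [hceq], by rw [getD_append_last]⟩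
  · -- replace branch: c < arr.length, arr[c] gets lowered to v
    have hclt : c < arr.length := by
      rcases lt_or_eq_of_le (tw_len_le arr (f := fun a => decide (a < v))) with h | h
      · rw [hc'] at h; exact h
      · exfalso
        have := getD_tw (f := fun a => decide (a < v)) arr (arr.length - 1)
          (by rw [h]; omega)
        simp only [decide_eq_true_eq] at this
        omega
    have hvle : v ≤ arr.getD c 0 := by
      have := getD_tw_stop (f := fun a => decide (a < v)) arr (by rw [hc']; exact hclt)
      rw [hc'] at this
      simp only [decide_eq_false_iff_not, not_lt] at this
      omega
    have hltc : ∀ k, k < c → arr.getD k 0 < v := by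
      intro k hk
      have := getD_tw (f := fun a => decide (a < v)) arr k (by rw [hc']; exact hk)
      simpa using this
    have hpw' : ∀ i j, i < j → j < arr.length →
        (arr.set c v).getD i 0 < (arr.set c v).getD j 0 := by
      intro i j hij hj
      rcases eq_or_ne i c with hi | hi
      · rw [hi, getD_set_self arr c v (by omega), getD_set_ne arr c j v (by omega)]
        exact lt_of_le_of_lt hvle (pw_getD hpw (hi ▸ hij) hj)
      · rcases eq_or_ne j c with hjc | hjc
        · rw [hjc, getD_set_self arr c v (by omega), getD_set_ne arr c i v (Ne.symm hi)]
          exact hltc i (by omega)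
        · rw [getD_set_ne arr c i v (Ne.symm hi), getD_set_ne arr c j v (Ne.symm hjc)]
          exact pw_getD hpw hij hj
    refine ⟨arr.set c v, ?_, ?_, ?_, ?_, ?_⟩
    · simp only [dpAStep, if_neg hbr]
      simp [← hc]
    · intro h
      apply hne
      have := congrArg List.length h
      simp at this
      exact this
    · refine List.pairwise_iff_getElem.mpr ?_
      intro i j hi hj hij
      have := hpw' i j hij (by simpa using hj)
      rwa [List.getD_eq_getElem _ 0 hi, List.getD_eq_getElem _ 0 hj] at this
    · intro k hk
      rw [hzip]
      simp only [List.length_set] at hk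
      rcases eq_or_ne k c with hkc | hkc
      · rw [hkc, getD_set_self arr c v (by omega)]
        simp
      · rw [getD_set_ne arr c k v (Ne.symm hkc)]
        exact List.mem_append_left _ (hex k hk)
    · intro q hq
      rw [hzip] at hq
      rcases List.mem_append.mp hq with h | h
      · obtain ⟨k, hk, hk2, hk3⟩ := hmin q h
        rcases eq_or_ne k c with hkc | hkc
        · rw [hkc] at hk3
          refine ⟨c, by simpa using hclt, by rw [hk2, hkc], ?_⟩
          rw [getD_set_self arr c v (by omega)]
          omega
        · exact ⟨k, by simpa using hk, hk2,
            by rw [getD_set_ne arr c k v (Ne.symm hkc)]; exact hk3⟩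
      · rw [List.mem_singleton.mp h]
        exact ⟨c, by simpa using hclt, by simp, by rw [getD_set_self arr c v (by omega)]⟩

-- the two loops stay in lockstep from any invariant state
lemma loop_eq (hs : List Int) : ∀ (rest p arr dp : List Int),
    hs = p ++ rest → dp.length = p.length → TailsInv (p.zip dp) arr →
    (rest.foldl dpAStep (arr, dp)).2 =
      rest.foldl (fun d v => d ++ [bestPrev hs d v + 1]) dp := by
  intro rest
  induction rest with
  | nil => intro p arr dp _ _ _; rfl
  | cons v rest ih =>
    intro p arr dp hsplit hlen hinv
    have hbp : bestPrev hs dp v = ((bisectLeft arr v : Nat) : Int) := by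
      have h1 : bestPrev hs dp v = bestPrev p dp v := by
        unfold bestPrev
        rw [hsplit, zip_trunc p (v :: rest) dp (le_of_eq hlen)]
      rw [h1]
      exact best_eq v p dp arr hinv
    obtain ⟨arr', hstep, hinv'⟩ := inv_step v p arr dp hinv hlen
    simp only [List.foldl_cons]
    rw [hstep, hbp]
    exact ih (p ++ [v]) arr' (dp ++ [((bisectLeft arr v : Nat) : Int) + 1])
      (by rw [hsplit]; simp) (by simp [hlen]) hinv'

-- ===== VERDICT (by name: the statement is the Claim_ definition above) =====
theorem dp_list_spec : Claim_equal_dp_list := by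
  intro hs _ hpre
  unfold Spec_dp_list
  cases hs with
  | nil => exact absurd rfl hpre
  | cons h t =>
    have hinit : TailsInv ([h].zip [(1 : Int)]) [h] := by
      refine ⟨by simp, by simp, ?_, ?_⟩
      · intro k hk
        have : k = 0 := by simpa using hk
        subst this
        simp
      · intro q hq
        have : q = (h, 1) := by simpa using hq
        subst this
        exact ⟨0, by simp, by simp, by simp⟩
    have hfirst : bestPrev (h :: t) [] h + 1 = 1 := by
      simp [bestPrev, List.zip_nil_right]
    calc dp_list (h :: t) = (t.foldl dpAStep ([h], [1])).2 := rfl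
      _ = t.foldl (fun d v => d ++ [bestPrev (h :: t) d v + 1]) [1] :=
          loop_eq (h :: t) t [h] [h] [1] rfl rfl hinit
      _ = dp_list_alt (h :: t) := by
          simp only [dp_list_alt, List.foldl_cons, List.nil_append, hfirst]
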